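-- pv_equiv track=rewrite | github.com/radicazz/airpods | airpods/cuda.py | select_cuda_version
-- ===== SOURCE A (Python) =====
-- from typing import Dict, Optional, Tuple
--
-- CUDA_COMPATIBILITY_MAP: Dict[Tuple[int, int], str] = {
--     # Compute 3.5-5.2 (Kepler, Maxwell, Pascal gen1) - max CUDA 11.8
--     (3, 5): "cu118",
--     (3, 7): "cu118",
--     (5, 0): "cu118",
--     (5, 2): "cu118",
--     (5, 3): "cu118",
--     # Compute 6.0-7.5 (Pascal, Volta, Turing) - max CUDA 12.6
--     (6, 0): "cu126",
--     (6, 1): "cu126",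
--     (6, 2): "cu126",
--     (7, 0): "cu126",
--     (7, 2): "cu126",
--     (7, 5): "cu126",
--     # Compute 8.0-8.9 (Ampere) - max CUDA 12.8
--     (8, 0): "cu128",
--     (8, 6): "cu128",
--     (8, 7): "cu128",
--     (8, 9): "cu128",
--     # Compute 9.0+ (Hopper and newer) - CUDA 13.0+
--     (9, 0): "cu130",
-- }
--
-- DEFAULT_CUDA_VERSION = "cu126"
--
-- def select_cuda_version(compute_cap: Optional[Tuple[int, int]]) -> str:
--     """Select appropriate CUDA version based on GPU compute capability.
--
--     Args:
--         compute_cap: Tuple of (major, minor) compute capability, e.g., (7, 5) for compute 7.5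
--
--     Returns:
--         CUDA version string like "cu126", "cu128", etc.
--         Defaults to "cu126" if compute_cap is None or not found in mapping.
--     """
--     if not compute_cap:
--         return DEFAULT_CUDA_VERSION
--
--     # Direct lookup first
--     if compute_cap in CUDA_COMPATIBILITY_MAP:
--         return CUDA_COMPATIBILITY_MAP[compute_cap]
--
--     # Fallback: find highest compatible version for this major.minor
--     major, minor = compute_cap
--     best_cuda = None
--
--     # Look for compatible versions in descending order of capability
--     for (cap_major, cap_minor), cuda_version in CUDA_COMPATIBILITY_MAP.items():
--         if cap_major == major:
--             # Same major version - check if this minor is compatible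
--             if cap_minor <= minor:
--                 # This capability is supported, use its CUDA version
--                 if best_cuda is None:
--                     best_cuda = cuda_version
--                 else:
--                     # Prefer newer CUDA versions when multiple are compatible
--                     if _cuda_version_newer(cuda_version, best_cuda):
--                         best_cuda = cuda_version
--         elif cap_major < major:
--             # Older major version is definitely compatible
--             if best_cuda is None:
--                 best_cuda = cuda_version
--             elif _cuda_version_newer(cuda_version, best_cuda):
--                 best_cuda = cuda_version
--
--     return best_cuda or DEFAULT_CUDA_VERSION
--
-- def _cuda_version_newer(version1: str, version2: str) -> bool:
--     """Return True if version1 is newer than version2."""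
--     # Extract numeric version: "cu126" -> 126
--     try:
--         num1 = int(version1[2:]) if version1.startswith("cu") else 0
--         num2 = int(version2[2:]) if version2.startswith("cu") else 0
--         return num1 > num2
--     except ValueError:
--         return False
-- ===== SOURCE B (Python) =====
-- from typing import Optional, Tuple
--
-- DEFAULT_CUDA_VERSION = "cu126"
--
--
-- def select_cuda_version(compute_cap: Optional[Tuple[int, int]]) -> str:
--     """Select appropriate CUDA version based on GPU compute capability.
--
--     Closed-form threshold chain: the compatibility table's CUDA version is
--     constant on four capability ranges, so only the range boundaries matter.
--     """
--     if not compute_cap: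
--         return DEFAULT_CUDA_VERSION
--     if compute_cap >= (9, 0):
--         return "cu130"
--     if compute_cap >= (8, 0):
--         return "cu128"
--     if compute_cap >= (6, 0):
--         return "cu126"
--     if compute_cap >= (3, 5):
--         return "cu118"
--     return DEFAULT_CUDA_VERSION
-- ===== Notes on version B (the rewrite author's own statement) =====
-- stated objective: simpler
-- what changed: Drops the compatibility table, the direct-lookup branch, the best-tracking loop and the _cuda_version_newer helper entirely, replacing them with a closed-form chain of four tuple-threshold comparisons on the range boundaries (the table's values are constant per range and monotone, so only boundaries matter).
import Mathlib
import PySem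

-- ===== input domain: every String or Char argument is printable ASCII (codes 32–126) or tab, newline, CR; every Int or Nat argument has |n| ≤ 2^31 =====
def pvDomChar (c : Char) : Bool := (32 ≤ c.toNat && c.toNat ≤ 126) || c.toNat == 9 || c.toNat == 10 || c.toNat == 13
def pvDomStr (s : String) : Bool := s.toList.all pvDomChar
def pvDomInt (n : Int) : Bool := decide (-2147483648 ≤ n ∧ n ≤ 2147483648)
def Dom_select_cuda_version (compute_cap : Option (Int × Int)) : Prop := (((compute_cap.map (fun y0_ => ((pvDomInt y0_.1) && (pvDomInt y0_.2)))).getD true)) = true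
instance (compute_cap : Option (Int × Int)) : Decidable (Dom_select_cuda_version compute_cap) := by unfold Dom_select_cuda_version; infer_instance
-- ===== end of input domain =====

-- B drops the table, lookup and best-tracking loop for a closed-form chain of four
-- tuple-threshold comparisons on the range boundaries (simpler decomposition).

-- ===== PORT A =====
-- module-level constant CUDA_COMPATIBILITY_MAP (dict in insertion order)
def cudaMap : List ((Int × Int) × String) :=
  [((3,5),"cu118"), ((3,7),"cu118"), ((5,0),"cu118"), ((5,2),"cu118"), ((5,3),"cu118"),
   ((6,0),"cu126"), ((6,1),"cu126"), ((6,2),"cu126"), ((7,0),"cu126"), ((7,2),"cu126"),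
   ((7,5),"cu126"), ((8,0),"cu128"), ((8,6),"cu128"), ((8,7),"cu128"), ((8,9),"cu128"),
   ((9,0),"cu130")]

def defaultCuda : String := "cu126"

-- _cuda_version_newer: int(v[2:]) can only raise ValueError, ported via ofStr? = none
def cuda_version_newer (version1 version2 : String) : Bool :=
  let n1? := if PySem.Str.startswith version1 "cu" then PySem.Int.ofStr? (PySem.Str.slice version1 (some 2) none) else some 0
  let n2? := if PySem.Str.startswith version2 "cu" then PySem.Int.ofStr? (PySem.Str.slice version2 (some 2) none) else some 0
  match n1?, n2? with
  | some num1, some num2 => num1 > num2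
  | _, _ => false

def select_cuda_version (compute_cap : Option (Int × Int)) : String :=
  match compute_cap with
  | none => defaultCuda
  | some (major, minor) =>
    -- direct lookup first: compute_cap in CUDA_COMPATIBILITY_MAP
    if (PySem.Dict.mk cudaMap).contains (major, minor) then
      ((PySem.Dict.mk cudaMap).get? (major, minor)).getD ""
    else
      -- fallback loop tracking best_cuda
      let best := cudaMap.foldl (fun best_cuda kv =>
        let cap_major := kv.1.1
        let cap_minor := kv.1.2
        let cuda_version := kv.2
        if cap_major = major then
          if cap_minor ≤ minor then
            if best_cuda = none then some cuda_version
            else if cuda_version_newer cuda_version (best_cuda.getD "") then some cuda_version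
            else best_cuda
          else best_cuda
        else if cap_major < major then
          if best_cuda = none then some cuda_version
          else if cuda_version_newer cuda_version (best_cuda.getD "") then some cuda_version
          else best_cuda
        else best_cuda) none
      -- `best_cuda or DEFAULT_CUDA_VERSION` (no stored cuda string is empty/falsy)
      best.getD defaultCuda

-- ===== PORT B =====
-- Python tuple `>=` on (Int × Int) pairs, written out lexicographically
def select_cuda_version_alt (compute_cap : Option (Int × Int)) : String :=
  match compute_cap with
  | none => "cu126"
  | some (mj, mn) =>
    if 9 < mj ∨ (mj = 9 ∧ 0 ≤ mn) then "cu130"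
    else if 8 < mj ∨ (mj = 8 ∧ 0 ≤ mn) then "cu128"
    else if 6 < mj ∨ (mj = 6 ∧ 0 ≤ mn) then "cu126"
    else if 3 < mj ∨ (mj = 3 ∧ 5 ≤ mn) then "cu118"
    else "cu126"

-- ===== PRECONDITION & SPEC =====
def Spec_select_cuda_version (compute_cap : Option (Int × Int)) (out : String) : Prop := out = select_cuda_version_alt compute_cap
instance (compute_cap : Option (Int × Int)) (out : String) : Decidable (Spec_select_cuda_version compute_cap out) := by unfold Spec_select_cuda_version; infer_instance

-- ===== CLAIM (what is proved, stated in full; the proofs are below) =====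
def Claim_equal_select_cuda_version : Prop := ∀ (compute_cap : Option (Int × Int)), Dom_select_cuda_version compute_cap → Spec_select_cuda_version compute_cap (select_cuda_version compute_cap)

-- ===== LEMMAS AND PROOFS =====

-- cuda_version_newer on the stored version strings, evaluated once
theorem newer_118_118 : cuda_version_newer "cu118" "cu118" = false := by decide
theorem newer_126_118 : cuda_version_newer "cu126" "cu118" = true := by decide
theorem newer_126_126 : cuda_version_newer "cu126" "cu126" = false := by decide
theorem newer_128_126 : cuda_version_newer "cu128" "cu126" = true := by decide
theorem newer_128_128 : cuda_version_newer "cu128" "cu128" = false := by decide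
theorem newer_130_128 : cuda_version_newer "cu130" "cu128" = true := by decide

-- the pointwise core: A and B agree on every (major, minor)
theorem core (mj mn : Int) :
    select_cuda_version (some (mj, mn)) = select_cuda_version_alt (some (mj, mn)) := by
  by_cases hlo : mj < 3
  · simp [select_cuda_version, select_cuda_version_alt, cudaMap, defaultCuda,
      show ¬((3:Int) = mj) by omega, show ¬((3:Int) < mj) by omega,
      show ¬((5:Int) = mj) by omega, show ¬((5:Int) < mj) by omega,
      show ¬((6:Int) = mj) by omega, show ¬((6:Int) < mj) by omega,
      show ¬((7:Int) = mj) by omega, show ¬((7:Int) < mj) by omega,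
      show ¬((8:Int) = mj) by omega, show ¬((8:Int) < mj) by omega,
      show ¬((9:Int) = mj) by omega, show ¬((9:Int) < mj) by omega,
      show ¬(mj = 9) by omega, show ¬(mj = 8) by omega,
      show ¬(mj = 6) by omega, show ¬(mj = 3) by omega]
    try decide
  · by_cases hhi : 9 < mj
    · simp [select_cuda_version, select_cuda_version_alt, cudaMap, defaultCuda,
        newer_118_118, newer_126_118, newer_126_126, newer_128_126, newer_128_128, newer_130_128,
        show ¬((3:Int) = mj) by omega, show (3:Int) < mj by omega,
        show ¬((5:Int) = mj) by omega, show (5:Int) < mj by omega,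
        show ¬((6:Int) = mj) by omega, show (6:Int) < mj by omega,
        show ¬((7:Int) = mj) by omega, show (7:Int) < mj by omega,
        show ¬((8:Int) = mj) by omega, show (8:Int) < mj by omega,
        show ¬((9:Int) = mj) by omega, show (9:Int) < mj by omega]
      try decide
    · have h1 : 3 ≤ mj := by omega
      have h2 : mj ≤ 9 := by omega
      interval_cases mj
      · -- mj = 3, minors 5 and 7
        by_cases hm : mn < 5
        · simp [select_cuda_version, select_cuda_version_alt, cudaMap, defaultCuda,
            show ¬((5:Int) ≤ mn) by omega, show ¬((7:Int) ≤ mn) by omega,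
            show ¬((5:Int) = mn) by omega, show ¬((7:Int) = mn) by omega]
          try decide
        · by_cases hm' : 7 < mn
          · simp [select_cuda_version, select_cuda_version_alt, cudaMap, defaultCuda,
              newer_118_118,
              show (5:Int) ≤ mn by omega, show (7:Int) ≤ mn by omega,
              show ¬((5:Int) = mn) by omega, show ¬((7:Int) = mn) by omega]
            try decide
          · have : 5 ≤ mn := by omega
            have : mn ≤ 7 := by omega
            interval_cases mn <;> decide
      · -- mj = 4
        simp [select_cuda_version, select_cuda_version_alt, cudaMap, defaultCuda, newer_118_118]
        try decide
      · -- mj = 5, minors 0, 2, 3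
        by_cases hm : mn < 0
        · simp [select_cuda_version, select_cuda_version_alt, cudaMap, defaultCuda, newer_118_118,
            show ¬((0:Int) ≤ mn) by omega, show ¬((2:Int) ≤ mn) by omega, show ¬((3:Int) ≤ mn) by omega,
            show ¬((0:Int) = mn) by omega, show ¬((2:Int) = mn) by omega, show ¬((3:Int) = mn) by omega]
          try decide
        · by_cases hm' : 3 < mn
          · simp [select_cuda_version, select_cuda_version_alt, cudaMap, defaultCuda, newer_118_118,
              show (0:Int) ≤ mn by omega, show (2:Int) ≤ mn by omega, show (3:Int) ≤ mn by omega,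
              show ¬((0:Int) = mn) by omega, show ¬((2:Int) = mn) by omega, show ¬((3:Int) = mn) by omega]
            try decide
          · have : 0 ≤ mn := by omega
            have : mn ≤ 3 := by omega
            interval_cases mn <;> decide
      · -- mj = 6, minors 0, 1, 2
        by_cases hm : mn < 0
        · simp [select_cuda_version, select_cuda_version_alt, cudaMap, defaultCuda, newer_118_118,
            show ¬((0:Int) ≤ mn) by omega, show ¬((1:Int) ≤ mn) by omega, show ¬((2:Int) ≤ mn) by omega,
            show ¬((0:Int) = mn) by omega, show ¬((1:Int) = mn) by omega, show ¬((2:Int) = mn) by omega]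
          try decide
        · by_cases hm' : 2 < mn
          · simp [select_cuda_version, select_cuda_version_alt, cudaMap, defaultCuda,
              newer_118_118, newer_126_118, newer_126_126,
              show (0:Int) ≤ mn by omega, show (1:Int) ≤ mn by omega, show (2:Int) ≤ mn by omega,
              show ¬((0:Int) = mn) by omega, show ¬((1:Int) = mn) by omega, show ¬((2:Int) = mn) by omega]
            try decide
          · have : 0 ≤ mn := by omega
            have : mn ≤ 2 := by omega
            interval_cases mn <;> decide
      · -- mj = 7, minors 0, 2, 5
        by_cases hm : mn < 0
        · simp [select_cuda_version, select_cuda_version_alt, cudaMap, defaultCuda,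
            newer_118_118, newer_126_118, newer_126_126,
            show ¬((0:Int) ≤ mn) by omega, show ¬((2:Int) ≤ mn) by omega, show ¬((5:Int) ≤ mn) by omega,
            show ¬((0:Int) = mn) by omega, show ¬((2:Int) = mn) by omega, show ¬((5:Int) = mn) by omega]
          try decide
        · by_cases hm' : 5 < mn
          · simp [select_cuda_version, select_cuda_version_alt, cudaMap, defaultCuda,
              newer_118_118, newer_126_118, newer_126_126,
              show (0:Int) ≤ mn by omega, show (2:Int) ≤ mn by omega, show (5:Int) ≤ mn by omega,
              show ¬((0:Int) = mn) by omega, show ¬((2:Int) = mn) by omega, show ¬((5:Int) = mn) by omega]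
            try decide
          · have : 0 ≤ mn := by omega
            have : mn ≤ 5 := by omega
            interval_cases mn <;> decide
      · -- mj = 8, minors 0, 6, 7, 9
        by_cases hm : mn < 0
        · simp [select_cuda_version, select_cuda_version_alt, cudaMap, defaultCuda,
            newer_118_118, newer_126_118, newer_126_126,
            show ¬((0:Int) ≤ mn) by omega, show ¬((6:Int) ≤ mn) by omega,
            show ¬((7:Int) ≤ mn) by omega, show ¬((9:Int) ≤ mn) by omega,
            show ¬((0:Int) = mn) by omega, show ¬((6:Int) = mn) by omega,
            show ¬((7:Int) = mn) by omega, show ¬((9:Int) = mn) by omega]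
          try decide
        · by_cases hm' : 9 < mn
          · simp [select_cuda_version, select_cuda_version_alt, cudaMap, defaultCuda,
              newer_118_118, newer_126_118, newer_126_126, newer_128_126, newer_128_128,
              show (0:Int) ≤ mn by omega, show (6:Int) ≤ mn by omega,
              show (7:Int) ≤ mn by omega, show (9:Int) ≤ mn by omega,
              show ¬((0:Int) = mn) by omega, show ¬((6:Int) = mn) by omega,
              show ¬((7:Int) = mn) by omega, show ¬((9:Int) = mn) by omega]
            try decide
          · have : 0 ≤ mn := by omega
            have : mn ≤ 9 := by omega
            interval_cases mn <;> decide
      · -- mj = 9, minor 0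
        by_cases hm : mn < 0
        · simp [select_cuda_version, select_cuda_version_alt, cudaMap, defaultCuda,
            newer_118_118, newer_126_118, newer_126_126, newer_128_126, newer_128_128,
            show ¬((0:Int) ≤ mn) by omega, show ¬((0:Int) = mn) by omega]
          try decide
        · by_cases hm' : 0 < mn
          · simp [select_cuda_version, select_cuda_version_alt, cudaMap, defaultCuda,
              newer_118_118, newer_126_118, newer_126_126, newer_128_126, newer_128_128, newer_130_128,
              show (0:Int) ≤ mn by omega, show ¬((0:Int) = mn) by omega]
            try decide
          · have : mn = 0 := by omega
            subst this
            try decide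

-- ===== VERDICT (by name: the statement is the Claim_ definition above) =====
theorem select_cuda_version_spec : Claim_equal_select_cuda_version := by
  intro cc _
  unfold Spec_select_cuda_version
  rcases cc with _ | ⟨mj, mn⟩
  · rfl
  · exact core mj mn
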